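-- pv_equiv track=rewrite | github.com/sonya921/project | Analy_intensity/platoon.py | FollowCAV
-- ===== SOURCE A (Python) =====
-- def FollowCAV(UPList): #cav-cav跟驰数量计算
--     Num_N11=[]
--     for i in range(len(UPList)):
--         UPList1=UPList[i]
--         N11=0
--         for j in range(len(UPList1)-1):
--
--             if UPList1[j]==UPList1[j+1]==1:
--                 N11+=1
--         Num_N11.append(N11)
--     return Num_N11
-- ===== SOURCE B (Python) =====
-- def FollowCAV(UPList):
--     res = []
--     for row in UPList:
--         ones = 0
--         runs = 0
--         prev = None
--         for x in row:
--             if x == 1: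
--                 ones += 1
--                 if prev != 1:
--                     runs += 1
--             prev = x
--         res.append(ones - runs)
--     return res
-- ===== Notes on version B (the rewrite author's own statement) =====
-- stated objective: alternative
-- what changed: Counts adjacent (1,1) pairs per sublist as ones-minus-number-of-1-runs in a single value-tracking pass over the elements instead of testing each index pair UPList1[j]==UPList1[j+1]==1 via range/subscripting.
import Mathlib
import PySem

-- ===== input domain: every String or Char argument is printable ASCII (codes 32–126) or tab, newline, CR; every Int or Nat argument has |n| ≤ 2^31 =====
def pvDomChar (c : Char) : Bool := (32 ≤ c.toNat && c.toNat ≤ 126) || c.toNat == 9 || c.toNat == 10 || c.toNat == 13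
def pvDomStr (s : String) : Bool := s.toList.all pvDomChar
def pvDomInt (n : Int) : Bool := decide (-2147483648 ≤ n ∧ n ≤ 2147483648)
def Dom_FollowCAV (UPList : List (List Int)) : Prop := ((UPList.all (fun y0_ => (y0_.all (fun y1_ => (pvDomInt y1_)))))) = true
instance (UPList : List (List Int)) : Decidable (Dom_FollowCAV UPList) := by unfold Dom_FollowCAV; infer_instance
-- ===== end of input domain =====

-- B changes the per-sublist count from testing each adjacent index pair to a single
-- run-tracking pass (ones minus number of 1-runs); same cost, different decomposition.

-- ===== PORT A =====
-- inner loop: for j in range(len(UPList1)-1): if UPList1[j]==UPList1[j+1]==1: N11+=1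
-- (indices j, j+1 are always in range, so pyGetD is exact here)
def FollowCAV_rowA (l : List Int) : Int :=
  (PySem.List.pyRange 0 ((l.length : Int) - 1) 1).foldl
    (fun N11 j =>
      if PySem.List.pyGetD l j 0 = PySem.List.pyGetD l (j + 1) 0 ∧
         PySem.List.pyGetD l (j + 1) 0 = 1 then N11 + 1 else N11) 0

def FollowCAV (UPList : List (List Int)) : List Int :=
  (PySem.List.pyRange 0 (UPList.length : Int) 1).foldl
    (fun acc i => acc ++ [FollowCAV_rowA (PySem.List.pyGetD UPList i [])]) []

-- ===== PORT B =====
-- one pass per row carrying (ones, runs, prev); result is ones - runs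
def FollowCAV_stepB (s : Int × Int × Option Int) (x : Int) : Int × Int × Option Int :=
  if x = 1 then (s.1 + 1, if s.2.2 ≠ some 1 then s.2.1 + 1 else s.2.1, some x)
  else (s.1, s.2.1, some x)

def FollowCAV_rowB (row : List Int) : Int :=
  let s := row.foldl FollowCAV_stepB (0, 0, none)
  s.1 - s.2.1

def FollowCAV_alt (UPList : List (List Int)) : List Int :=
  UPList.foldl (fun res row => res ++ [FollowCAV_rowB row]) []

-- ===== PRECONDITION & SPEC =====
def Spec_FollowCAV (UPList : List (List Int)) (out : List Int) : Prop := out = FollowCAV_alt UPList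
instance (UPList : List (List Int)) (out : List Int) : Decidable (Spec_FollowCAV UPList out) := by unfold Spec_FollowCAV; infer_instance

-- ===== CLAIM (what is proved, stated in full; the proofs are below) =====
def Claim_equal_FollowCAV : Prop := ∀ (UPList : List (List Int)), Dom_FollowCAV UPList → Spec_FollowCAV UPList (FollowCAV UPList)

-- ===== LEMMAS AND PROOFS =====

-- reference count: adjacent (1,1) pairs of (prev-extended) list
def pvCnt : Option Int → List Int → Int
  | _, [] => 0
  | p, x :: t => (if p = some 1 ∧ x = 1 then 1 else 0) + pvCnt (some x) t

lemma rowA_zip_aux (t : List Int) : ∀ (x : Int) (n : Int),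
    ((x :: t).zip t).foldl
      (fun N11 p => if p.1 = p.2 ∧ p.2 = 1 then N11 + 1 else N11) n
      = n + pvCnt (some x) t := by
  induction t with
  | nil => intro x n; simp [pvCnt]
  | cons y t ih =>
      intro x n
      simp only [List.zip_cons_cons, List.foldl_cons, pvCnt, ih y]
      split_ifs with h1 h2 h2 <;> simp_all; omega

lemma rowA_eq_cnt (l : List Int) : FollowCAV_rowA l = pvCnt none l := by
  have hlen : (l.zip l.tail).length = l.length - 1 := by
    cases l <;> simp [List.length_zip]
  have hrange : PySem.List.pyRange 0 ((l.length : Int) - 1) 1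
      = PySem.List.pyRange 0 ((l.zip l.tail).length : Int) 1 := by
    cases l with
    | nil => simp [PySem.List.pyRange]
    | cons x t =>
        have : ((x :: t).length : Int) - 1 = (((x :: t).zip (x :: t).tail).length : Int) := by
          simp [List.length_zip]
        rw [this]
  have hget : ∀ (N11 : Int), ∀ j ∈ PySem.List.pyRange 0 ((l.zip l.tail).length : Int) 1,
      (if PySem.List.pyGetD l j 0 = PySem.List.pyGetD l (j + 1) 0 ∧
          PySem.List.pyGetD l (j + 1) 0 = 1 then N11 + 1 else N11)
      = (fun N11 p => if (p : Int × Int).1 = p.2 ∧ p.2 = 1 then N11 + 1 else N11)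
          N11 (PySem.List.pyGetD (l.zip l.tail) j (0, 0)) := by
    intro N11 j hj
    rw [PySem.List.mem_pyRange_one] at hj
    obtain ⟨h0, hlt⟩ := hj
    have hj' : j.toNat < (l.zip l.tail).length := by omega
    have h1 : j.toNat < l.length := by omega
    have h2 : j.toNat + 1 < l.length := by omega
    have e1 : PySem.List.pyGetD l j 0 = l[j.toNat] :=
      PySem.List.pyGetD_eq_getElem l 0 (by omega) (by omega)
    have e2 : PySem.List.pyGetD l (j + 1) 0 = l[j.toNat + 1] := by
      rw [PySem.List.pyGetD_eq_getElem l (i := j + 1) 0 (by omega) (by omega)]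
      congr 1
      omega
    have htl : l.tail.length = l.length - 1 := by simp
    have e3 : PySem.List.pyGetD (l.zip l.tail) j (0, 0) = (l.zip l.tail)[j.toNat] :=
      PySem.List.pyGetD_eq_getElem (l.zip l.tail) (0, 0) (by omega) (by omega)
    have hz : (l.zip l.tail)[j.toNat] = (l[j.toNat], l.tail[j.toNat]'(by simp; omega)) := by
      simp [List.getElem_zip]
    have ht : l.tail[j.toNat]'(by simp; omega) = l[j.toNat + 1] := by
      simp [List.getElem_tail]
    rw [e1, e2, e3, hz, ht]
  unfold FollowCAV_rowA
  rw [hrange, PySem.List.foldl_congr_mem _ _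
        (fun N11 j => (fun N11 (p : Int × Int) => if p.1 = p.2 ∧ p.2 = 1 then N11 + 1 else N11)
          N11 (PySem.List.pyGetD (l.zip l.tail) j (0, 0))) 0 hget,
      PySem.List.foldl_pyRange_zero_pyGetD' (l.zip l.tail) (0, 0)
        (fun N11 p => if p.1 = p.2 ∧ p.2 = 1 then N11 + 1 else N11) 0]
  cases l with
  | nil => simp [pvCnt]
  | cons x t =>
      have := rowA_zip_aux t x 0
      simpa [pvCnt] using this

lemma rowB_invariant (l : List Int) : ∀ (o r : Int) (p : Option Int),
    (l.foldl FollowCAV_stepB (o, r, p)).1 - (l.foldl FollowCAV_stepB (o, r, p)).2.1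
      = o - r + pvCnt p l := by
  induction l with
  | nil => intro o r p; simp [pvCnt]
  | cons x t ih =>
      intro o r p
      simp only [List.foldl_cons, FollowCAV_stepB, pvCnt]
      by_cases hx : x = 1 <;> by_cases hp : p = some 1 <;>
        simp [hx, hp, ih] <;> try ring

lemma rowB_eq_cnt (l : List Int) : FollowCAV_rowB l = pvCnt none l := by
  unfold FollowCAV_rowB
  simpa using rowB_invariant l 0 0 none

lemma rows_eq (l : List Int) : FollowCAV_rowA l = FollowCAV_rowB l := by
  rw [rowA_eq_cnt, rowB_eq_cnt]

lemma foldl_append_eq (f g : List Int → Int) (h : ∀ l, f l = g l) (xs : List (List Int)) :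
    ∀ (init : List Int),
    xs.foldl (fun acc l => acc ++ [f l]) init = xs.foldl (fun acc l => acc ++ [g l]) init := by
  induction xs with
  | nil => intro init; rfl
  | cons x t ih => intro init; simp only [List.foldl_cons, h x, ih]

-- ===== VERDICT (by name: the statement is the Claim_ definition above) =====
theorem FollowCAV_spec : Claim_equal_FollowCAV := by
  intro UPList _
  unfold Spec_FollowCAV FollowCAV FollowCAV_alt
  rw [PySem.List.foldl_pyRange_zero_pyGetD' UPList []
      (fun acc row => acc ++ [FollowCAV_rowA row]) []]
  exact foldl_append_eq _ _ rows_eq UPList []
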